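-- pv_equiv track=rewrite | github.com/ambertide/Beemu | tests/resources/token_test_generators/utils.py | get_opcode
-- ===== SOURCE A (Python) =====
-- def get_opcode(instruction: int) -> int:
--     """This is the byte(s) used to distinguish instr category.
--
--     Gameboy instructions are variable in their byte count,
--     for instructions starting with the 0xCB, their TWO BYTES
--     are considered the opcode, meanwhile for others only the LSB
--     is considered the opcode.
--     Args:
--             instruction (int): Raw instruction
--
--     Returns:
--             int: Opcode that can be used to distinguish
--             instruction type.
--     """
--     opcode_lsb = 0x00
--     # One before lsb
--     possible_opcode_msb = 0x00
--     while instruction != 0x00: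
--         possible_opcode_msb = opcode_lsb
--         opcode_lsb = instruction & 0xFF
--         instruction >>= 8
--     # When the instruction is zero, lsb will be the, well, lsb
--     # While the lsb2 will hopefully will be the one before lsb.
--     if opcode_lsb == 0xCB:
--         return (opcode_lsb << 8) | possible_opcode_msb
--     return opcode_lsb
-- ===== SOURCE B (Python) =====
-- def get_opcode(instruction: int) -> int:
--     nbytes = (instruction.bit_length() + 7) // 8
--     top = (instruction >> (8 * (nbytes - 1))) & 0xFF if nbytes else 0
--     if top != 0xCB:
--         return top
--     second = (instruction >> (8 * (nbytes - 2))) & 0xFF if nbytes >= 2 else 0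
--     return (top << 8) | second
-- ===== Notes on version B (the rewrite author's own statement) =====
-- stated objective: simpler
-- what changed: Replaces A's byte-shifting while-loop with closed-form bit arithmetic: compute the byte count from bit_length and extract the top one or two bytes by direct shifts.
-- outside the precondition, e.g. on get_opcode(-1): A does not finish within the time limit, B returns 255
import Mathlib
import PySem

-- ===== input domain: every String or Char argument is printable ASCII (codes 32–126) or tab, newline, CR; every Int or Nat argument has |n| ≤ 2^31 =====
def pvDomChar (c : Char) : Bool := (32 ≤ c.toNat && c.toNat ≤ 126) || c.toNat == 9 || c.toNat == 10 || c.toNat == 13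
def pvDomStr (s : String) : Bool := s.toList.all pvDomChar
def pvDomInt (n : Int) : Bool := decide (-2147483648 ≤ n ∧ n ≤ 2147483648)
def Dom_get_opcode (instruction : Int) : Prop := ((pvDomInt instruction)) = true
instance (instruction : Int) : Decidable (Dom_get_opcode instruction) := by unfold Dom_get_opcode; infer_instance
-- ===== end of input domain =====

-- B replaces A's byte-shifting while-loop by closed-form bit arithmetic on the byte count
-- (objective: simpler). A loops forever on negative inputs, so Pre_ is 0 ≤ instruction.

-- ===== PORT A =====
-- A's while-loop: state (opcode_lsb, possible_opcode_msb); on nonnegative ints (all of Pre_)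
-- 'instruction & 0xFF' is n % 256 and 'instruction >>= 8' is n / 256, run on Nat for
-- termination (exact on Pre_; on negatives Python A never returns).
def getOpcodeLoop (n lsb msb : Nat) : Nat × Nat :=
  if h : n ≠ 0 then getOpcodeLoop (n / 256) (n % 256) lsb else (lsb, msb)
  termination_by n
  decreasing_by exact Nat.div_lt_self (Nat.pos_of_ne_zero h) (by norm_num)

def get_opcode (instruction : Int) : Int :=
  let p := getOpcodeLoop instruction.toNat 0 0
  if p.1 = 0xCB then PySem.Int.bor ((p.1 : Int) <<< (8 : Nat)) (p.2 : Int) else (p.1 : Int)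

-- ===== PORT B =====
def get_opcode_alt (instruction : Int) : Int :=
  let nbytes : Nat := (PySem.Int.bitLength instruction + 7) / 8
  let top : Int :=
    if nbytes ≠ 0 then PySem.Int.band (instruction >>> (8 * (nbytes - 1))) 0xFF else 0
  if top ≠ 0xCB then top
  else
    let second : Int :=
      if 2 ≤ nbytes then PySem.Int.band (instruction >>> (8 * (nbytes - 2))) 0xFF else 0
    PySem.Int.bor (top <<< (8 : Nat)) second

-- ===== PRECONDITION & SPEC =====
-- Pre_ excludes negative instructions: there A's while-loop condition stays true forever
-- ('>>= 8' keeps a negative int negative) and A diverges, so A returns exactly on Pre_.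
def Pre_get_opcode (instruction : Int) : Prop := 0 ≤ instruction
instance (instruction : Int) : Decidable (Pre_get_opcode instruction) := by unfold Pre_get_opcode; infer_instance

def pvWitness_get_opcode : Int := 52020

def Spec_get_opcode (instruction : Int) (out : Int) : Prop := out = get_opcode_alt instruction
instance (instruction : Int) (out : Int) : Decidable (Spec_get_opcode instruction out) := by unfold Spec_get_opcode; infer_instance

-- ===== CLAIM (what is proved, stated in full; the proofs are below) =====
def Claim_equal_get_opcode : Prop := ∀ (instruction : Int), Dom_get_opcode instruction → Pre_get_opcode instruction → Spec_get_opcode instruction (get_opcode instruction)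

-- ===== LEMMAS AND PROOFS =====

-- Python bit_length on Nat, and the byte count / top two bytes (proof-side abbreviations)
def pyBitLength (n : Nat) : Nat := if n = 0 then 0 else Nat.log2 n + 1
def nbBytes (n : Nat) : Nat := (pyBitLength n + 7) / 8
def topByte (n : Nat) : Nat := (n >>> (8 * (nbBytes n - 1))) % 256
def sndByte (n : Nat) : Nat := (n >>> (8 * (nbBytes n - 2))) % 256

lemma pyBitLength_rec {n : Nat} (h : 1 ≤ n) : pyBitLength n = pyBitLength (n / 2) + 1 := by
  by_cases h2 : 2 ≤ n
  · have hd : n / 2 ≠ 0 := by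
      have : 0 < n / 2 := Nat.div_pos h2 (by norm_num)
      omega
    have hlog : Nat.log2 n = Nat.log2 (n / 2) + 1 := by
      rw [Nat.log2_eq_log_two, Nat.log2_eq_log_two]
      have hdb := Nat.log_div_base 2 n
      have hpos : 0 < Nat.log 2 n := Nat.log_pos (by norm_num) h2
      omega
    unfold pyBitLength
    rw [if_neg (by omega : ¬ n = 0), if_neg hd, hlog]
  · have : n = 1 := by omega
    subst this
    decide
lemma bitLength_cast (n : Nat) : PySem.Int.bitLength (n : Int) = pyBitLength n := by
  induction n using Nat.strong_induction_on with
  | _ n ih =>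
    by_cases h0 : n = 0
    · subst h0; decide
    · rw [PySem.Int.bitLength_natCast (by omega : 0 < n),
          ih (n / 2) (Nat.div_lt_self (by omega) (by norm_num)),
          pyBitLength_rec (by omega : 1 ≤ n)]

lemma byte_cast (n k : Nat) :
    PySem.Int.band ((n : Int) >>> k) 0xFF = (((n >>> k) % 256 : Nat) : Int) := by
  rw [← Int.natCast_shiftRight]
  have h1 : PySem.Int.band ((n >>> k : Nat) : Int) ((255 : Nat) : Int)
      = (((n >>> k) &&& 255 : Nat) : Int) := PySem.Int.band_natCast _ _
  have h2 : (n >>> k) &&& 255 = (n >>> k) % 256 := by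
    have h : (255 : Nat) = 2 ^ 8 - 1 := by norm_num
    rw [h, Nat.and_two_pow_sub_one_eq_mod]
  rw [show ((0xFF : Int)) = ((255 : Nat) : Int) by norm_num, h1, h2]

lemma log2_div256 {n : Nat} (h : 256 ≤ n) : Nat.log2 (n / 256) = Nat.log2 n - 8 := by
  have hn : n ≠ 0 := by omega
  have hL8 : ¬ (Nat.log2 n < 8) := by
    rw [Nat.log2_lt hn]; omega
  set L := Nat.log2 n with hLdef
  have hnd : n / 256 ≠ 0 := by
    have : 0 < n / 256 := Nat.div_pos h (by norm_num)
    omega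
  have hub : n < 2 ^ (L + 1) := Nat.lt_log2_self
  have hlb : 2 ^ L ≤ n := Nat.log2_self_le hn
  have h1 : Nat.log2 (n / 256) < L - 8 + 1 := by
    rw [Nat.log2_lt hnd]
    have : n < 2 ^ (L - 8 + 1) * 256 := by
      have : (2 : Nat) ^ (L - 8 + 1) * 256 = 2 ^ (L + 1) := by
        have h256 : (256 : Nat) = 2 ^ 8 := by norm_num
        rw [h256, ← pow_add]
        congr 1; omega
      omega
    omega
  have h2 : ¬ (Nat.log2 (n / 256) < L - 8) := by
    rw [Nat.log2_lt hnd]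
    have : 2 ^ (L - 8) * 256 ≤ n := by
      have : (2 : Nat) ^ (L - 8) * 256 = 2 ^ L := by
        have h256 : (256 : Nat) = 2 ^ 8 := by norm_num
        rw [h256, ← pow_add]
        congr 1; omega
      omega
    omega
  omega

lemma nbBytes_eq_one {n : Nat} (h0 : n ≠ 0) : nbBytes n = 1 ↔ n < 256 := by
  unfold nbBytes pyBitLength
  rw [if_neg h0]
  have := (Nat.log2_lt h0 (k := 8))
  constructor
  · intro h; rw [← this]; omega
  · intro h; have : Nat.log2 n < 8 := this.mpr (by norm_num at this ⊢; omega)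
    omega

lemma nbBytes_div256 {n : Nat} (h : 256 ≤ n) : nbBytes (n / 256) = nbBytes n - 1 := by
  have hn : n ≠ 0 := by omega
  have hnd : n / 256 ≠ 0 := by
    have : 0 < n / 256 := Nat.div_pos h (by norm_num)
    omega
  have hL8 : ¬ (Nat.log2 n < 8) := by rw [Nat.log2_lt hn]; omega
  unfold nbBytes pyBitLength
  rw [if_neg hn, if_neg hnd, log2_div256 h]
  omega

lemma shift_div256 (n i : Nat) : (n / 256) >>> i = n >>> (i + 8) := by
  simp only [Nat.shiftRight_eq_div_pow, Nat.div_div_eq_div_mul]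
  rw [pow_add]
  norm_num
  ring_nf

lemma loop_char (n : Nat) : ∀ l m : Nat, getOpcodeLoop n l m =
    if n = 0 then (l, m) else (topByte n, if n < 256 then l else sndByte n) := by
  induction n using Nat.strong_induction_on with
  | _ n ih =>
    intro l m
    rw [getOpcodeLoop]
    by_cases h0 : n = 0
    · simp [h0]
    · rw [dif_pos h0, if_neg h0]
      by_cases hs : n < 256
      · have hd : n / 256 = 0 := Nat.div_eq_of_lt hs
        rw [hd, getOpcodeLoop, dif_neg (by simp : ¬ ((0:Nat) ≠ 0)), if_pos hs]
        have hnb : nbBytes n = 1 := (nbBytes_eq_one h0).mpr hs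
        unfold topByte
        rw [hnb]
        simp [Nat.mod_eq_of_lt hs]
      · have h256 : 256 ≤ n := by omega
        have hnd : n / 256 ≠ 0 := by
          have : 0 < n / 256 := Nat.div_pos h256 (by norm_num)
          omega
        rw [ih (n / 256) (Nat.div_lt_self (by omega) (by norm_num)) (n % 256) l]
        rw [if_neg hnd, if_neg hs]
        have hnb : nbBytes (n / 256) = nbBytes n - 1 := nbBytes_div256 h256
        have hnb2 : 2 ≤ nbBytes n := by
          have h1 : nbBytes n ≠ 1 := by
            intro h; exact hs ((nbBytes_eq_one h0).mp h)
          have hpos : 1 ≤ nbBytes (n / 256) := by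
            unfold nbBytes pyBitLength
            rw [if_neg hnd]; omega
          omega
        rw [Prod.mk.injEq]
        refine ⟨?_, ?_⟩
        · -- top byte
          unfold topByte
          rw [hnb, shift_div256]
          congr 2
          omega
        · -- second byte
          by_cases hsm : n / 256 < 256
          · rw [if_pos hsm]
            have : nbBytes n = 2 := by
              have := (nbBytes_eq_one hnd).mpr hsm
              omega
            unfold sndByte
            rw [this]
            simp
          · rw [if_neg hsm]
            have h2' : nbBytes (n / 256) ≠ 1 := fun h => hsm ((nbBytes_eq_one hnd).mp h)
            have h3' : nbBytes (n / 256) ≠ 0 := by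
              unfold nbBytes pyBitLength; rw [if_neg hnd]; omega
            unfold sndByte
            rw [hnb, shift_div256]
            congr 2
            omega

lemma second_if (n : Nat) (h0 : n ≠ 0) :
    (if n < 256 then (0:Nat) else sndByte n) = (if 2 ≤ nbBytes n then sndByte n else 0) := by
  by_cases hs : n < 256
  · have : nbBytes n = 1 := (nbBytes_eq_one h0).mpr hs
    rw [if_pos hs, if_neg (by omega)]
  · have h1 : nbBytes n ≠ 1 := fun h => hs ((nbBytes_eq_one h0).mp h)
    have h2 : nbBytes n ≠ 0 := by unfold nbBytes pyBitLength; rw [if_neg h0]; omega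
    rw [if_neg hs, if_pos (by omega)]

theorem get_opcode_spec : Claim_equal_get_opcode := by
  intro instruction _ hpre
  obtain ⟨n, rfl⟩ : ∃ m : Nat, instruction = (m : Int) :=
    ⟨instruction.toNat, (Int.toNat_of_nonneg hpre).symm⟩
  unfold Spec_get_opcode get_opcode get_opcode_alt
  simp only [Int.toNat_natCast, bitLength_cast, byte_cast]
  rw [loop_char n 0 0]
  by_cases h0 : n = 0
  · subst h0; decide
  · have hnb0 : (pyBitLength n + 7) / 8 ≠ 0 := by
      unfold pyBitLength; rw [if_neg h0]; omega
    simp only [ne_eq, hnb0, not_false_iff, if_true, if_neg h0]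
    have hT : (n >>> (8 * ((pyBitLength n + 7) / 8 - 1))) % 256 = topByte n := rfl
    have hS : (n >>> (8 * ((pyBitLength n + 7) / 8 - 2))) % 256 = sndByte n := rfl
    have hN : (pyBitLength n + 7) / 8 = nbBytes n := rfl
    rw [hT, hS, hN]
    by_cases hcb : topByte n = 0xCB
    · have hcb' : ¬ ((topByte n : Int) ≠ 0xCB) := by
        simp [hcb]
      rw [if_pos hcb, if_neg hcb', hcb, second_if n h0]
      split_ifs <;> simp
    · have hcb' : ((topByte n : Int) ≠ 0xCB) := by
        exact_mod_cast fun h => hcb (by exact_mod_cast h)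
      rw [if_neg hcb, if_pos hcb']
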